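-- pv_equiv track=rewrite | github.com/eldariont/svim | callPacIndels.py | findIndelsInCigarTuples
-- ===== SOURCE A (Python) =====
-- def findIndelsInCigarTuples(tuples, minLength = 50):
--     """Parses CIGAR tuples (op, len) and returns Indels with a length > minLength"""
--     pos = 0
--     indels = []
--     for op, l in tuples:
--         if op == 0: #alignment match
--             pos += l
--         elif op == 1: #insertion
--             if l >= minLength:
--                 indels.append((pos, l, 'ins'))
--         elif op == 2: #deletion
--             if l >= minLength:
--                 indels.append((pos, l, 'del'))
--             pos += l
--         elif op == 7 or op == 8: #match or mismatch
--             pos += l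
--     return indels
-- ===== SOURCE B (Python) =====
-- def findIndelsInCigarTuples(tuples, minLength=50):
--     """Parses CIGAR tuples (op, len) and returns Indels with a length > minLength"""
--     # exclusive prefix sum of reference-consumed lengths -> position before each op
--     positions = []
--     p = 0
--     for op, l in tuples:
--         positions.append(p)
--         if op in (0, 2, 7, 8):
--             p += l
--     out = []
--     for (op, l), pos in zip(tuples, positions):
--         if l >= minLength:
--             if op == 1:
--                 out.append((pos, l, 'ins'))
--             elif op == 2:
--                 out.append((pos, l, 'del'))
--     return out
-- ===== Notes on version B (the rewrite author's own statement) =====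
-- stated objective: alternative
-- what changed: Replaced the single interleaved accumulate-and-branch loop by two passes: an exclusive prefix sum of reference-consumed lengths giving the position before each op, then a filtering pass over the zipped (tuple, position) list.
import Mathlib
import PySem

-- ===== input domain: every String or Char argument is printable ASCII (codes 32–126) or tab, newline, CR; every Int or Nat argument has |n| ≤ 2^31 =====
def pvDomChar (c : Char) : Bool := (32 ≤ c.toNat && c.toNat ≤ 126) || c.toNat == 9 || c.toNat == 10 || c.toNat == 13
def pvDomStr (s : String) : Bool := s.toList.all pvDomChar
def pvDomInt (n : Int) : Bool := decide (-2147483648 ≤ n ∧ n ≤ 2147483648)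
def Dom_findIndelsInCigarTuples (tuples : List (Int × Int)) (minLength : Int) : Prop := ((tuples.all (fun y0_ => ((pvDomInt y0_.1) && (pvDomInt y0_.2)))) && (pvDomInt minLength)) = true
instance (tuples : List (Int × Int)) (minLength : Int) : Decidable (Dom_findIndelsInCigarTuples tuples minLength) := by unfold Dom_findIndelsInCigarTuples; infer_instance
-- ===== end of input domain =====

-- B replaces A's single accumulate-and-branch loop by an exclusive prefix sum of reference-consumed
-- lengths followed by a filtering pass over the zipped (tuple, position) list (objective: alternative).

-- ===== PORT A =====
-- A's for-loop over tuples carrying (pos, indels); each append becomes a cons on the result of the tail.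
def pvLoopA (minLength pos : Int) : List (Int × Int) → List (Int × Int × String)
  | [] => []
  | (op, l) :: rest =>
    if op == 0 then pvLoopA minLength (pos + l) rest
    else if op == 1 then
      (if l ≥ minLength then (pos, l, "ins") :: pvLoopA minLength pos rest
       else pvLoopA minLength pos rest)
    else if op == 2 then
      (if l ≥ minLength then (pos, l, "del") :: pvLoopA minLength (pos + l) rest
       else pvLoopA minLength (pos + l) rest)
    else if op == 7 || op == 8 then pvLoopA minLength (pos + l) rest
    else pvLoopA minLength pos rest

def findIndelsInCigarTuples (tuples : List (Int × Int)) (minLength : Int) : List (Int × Int × String) :=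
  pvLoopA minLength 0 tuples

-- ===== PORT B =====
-- first pass: exclusive prefix sum of reference-consumed lengths
def pvPositions (p : Int) : List (Int × Int) → List Int
  | [] => []
  | (op, l) :: rest =>
    p :: pvPositions (if op == 0 || op == 2 || op == 7 || op == 8 then p + l else p) rest

-- second pass: filter the zipped (tuple, position) list
def pvPick (minLength : Int) : List ((Int × Int) × Int) → List (Int × Int × String)
  | [] => []
  | ((op, l), pos) :: rest =>
    if l ≥ minLength then
      (if op == 1 then (pos, l, "ins") :: pvPick minLength rest
       else if op == 2 then (pos, l, "del") :: pvPick minLength rest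
       else pvPick minLength rest)
    else pvPick minLength rest

def findIndelsInCigarTuples_alt (tuples : List (Int × Int)) (minLength : Int) : List (Int × Int × String) :=
  pvPick minLength (tuples.zip (pvPositions 0 tuples))

-- ===== PRECONDITION & SPEC =====
def Spec_findIndelsInCigarTuples (tuples : List (Int × Int)) (minLength : Int) (out : List (Int × Int × String)) : Prop := out = findIndelsInCigarTuples_alt tuples minLength
instance (tuples : List (Int × Int)) (minLength : Int) (out : List (Int × Int × String)) : Decidable (Spec_findIndelsInCigarTuples tuples minLength out) := by unfold Spec_findIndelsInCigarTuples; infer_instance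

-- ===== CLAIM (what is proved, stated in full; the proofs are below) =====
def Claim_equal_findIndelsInCigarTuples : Prop := ∀ (tuples : List (Int × Int)) (minLength : Int), Dom_findIndelsInCigarTuples tuples minLength → Spec_findIndelsInCigarTuples tuples minLength (findIndelsInCigarTuples tuples minLength)

-- ===== LEMMAS AND PROOFS =====
theorem pvLoopA_eq_pick (minLength : Int) (tuples : List (Int × Int)) :
    ∀ pos : Int, pvLoopA minLength pos tuples = pvPick minLength (tuples.zip (pvPositions pos tuples)) := by
  induction tuples with
  | nil => intro pos; rfl
  | cons t rest ih =>
    intro pos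
    obtain ⟨op, l⟩ := t
    simp only [pvLoopA, pvPositions, List.zip_cons_cons, pvPick]
    by_cases h0 : op = 0
    · subst h0; simp [ih]
    · by_cases h1 : op = 1
      · subst h1; simp [ih]
      · by_cases h2 : op = 2
        · subst h2; simp [ih]
        · by_cases h7 : op = 7
          · subst h7; simp [ih]
          · by_cases h8 : op = 8
            · subst h8; simp [ih]
            · simp [h0, h1, h2, h7, h8, ih]

-- ===== VERDICT (by name: the statement is the Claim_ definition above) =====
theorem findIndelsInCigarTuples_spec : Claim_equal_findIndelsInCigarTuples := by
  intro tuples minLength _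
  unfold Spec_findIndelsInCigarTuples findIndelsInCigarTuples findIndelsInCigarTuples_alt
  exact pvLoopA_eq_pick minLength tuples 0
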